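-- pv_equiv track=rewrite | github.com/antongigele/fuzzy_search | src/create_coocurence_dict.py | get_query_occurrences
-- ===== SOURCE A (Python) =====
-- def get_query_occurrences(string_to_count, query_list: list) -> list:
--     string_to_count_start = string_to_count + " "
--     string_to_count_middle = " " + string_to_count + " "
--     string_to_count_end = " " + string_to_count
--     query_occurrences = []
--
--     for query in query_list:
--         if query.startswith(string_to_count_start):
--             query_occurrences.append(query)
--         elif string_to_count_middle in query:
--             query_occurrences.append(query)
--         elif query.endswith(string_to_count_end):
--             query_occurrences.append(query)
--     return query_occurrences
-- ===== SOURCE B (Python) =====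
-- def _tokens(s):
--     toks = [""]
--     for c in s:
--         if c == " ":
--             toks.append("")
--         else:
--             toks[-1] += c
--     return toks
--
--
-- def _contains_run(toks, target):
--     n = len(target)
--     for i in range(len(toks) - n + 1):
--         if toks[i:i + n] == target:
--             return True
--     return False
--
--
-- def get_query_occurrences(string_to_count, query_list: list) -> list:
--     target = _tokens(string_to_count)
--     result = []
--     for query in query_list:
--         toks = _tokens(query)
--         if toks != target and _contains_run(toks, target):
--             result.append(query)
--     return result
-- ===== Notes on version B (the rewrite author's own statement) =====
-- stated objective: alternative
-- what changed: B tokenizes each string into its space-separated token list and selects a query when the needle's token list is a contiguous run inside the query's token list (and the token lists differ), replacing A's three substring boundary checks (startswith/in/endswith) with a token-level sliding-window comparison.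
import Mathlib
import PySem

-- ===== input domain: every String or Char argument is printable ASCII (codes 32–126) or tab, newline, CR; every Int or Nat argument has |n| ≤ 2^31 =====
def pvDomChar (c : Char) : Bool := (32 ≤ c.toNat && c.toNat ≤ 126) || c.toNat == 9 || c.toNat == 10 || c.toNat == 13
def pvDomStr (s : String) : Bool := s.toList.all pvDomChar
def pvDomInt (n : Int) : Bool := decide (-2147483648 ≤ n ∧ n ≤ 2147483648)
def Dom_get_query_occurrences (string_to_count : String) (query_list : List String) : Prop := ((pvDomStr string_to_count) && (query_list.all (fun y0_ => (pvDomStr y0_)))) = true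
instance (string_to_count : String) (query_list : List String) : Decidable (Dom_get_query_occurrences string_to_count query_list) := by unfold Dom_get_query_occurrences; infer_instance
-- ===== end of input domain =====

-- B tokenizes each string on single spaces and selects a query when the needle's token list is a
-- contiguous run inside the query's token list (and the two token lists differ), instead of A's
-- three substring boundary checks (objective: alternative).

-- ===== PORT A =====
-- Strings are handled as List Char via PySem.Chars (PySem string primitives are defined there).
def get_query_occurrences (string_to_count : String) (query_list : List String) : List String :=
  let stc := string_to_count.toList
  let string_to_count_start := stc ++ [' ']
  let string_to_count_middle := ' ' :: stc ++ [' ']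
  let string_to_count_end := ' ' :: stc
  query_list.foldl (fun query_occurrences query =>
    if PySem.Chars.startswith query.toList string_to_count_start then
      query_occurrences ++ [query]
    else if PySem.Chars.isIn string_to_count_middle query.toList then
      query_occurrences ++ [query]
    else if PySem.Chars.endswith query.toList string_to_count_end then
      query_occurrences ++ [query]
    else query_occurrences) []

-- ===== PORT B =====
-- _tokens: loop over the characters; a space closes the current token, any other char is
-- appended to the last token (toks[-1] += c).
def pvTokensStep (toks : List (List Char)) (c : Char) : List (List Char) :=
  if c = ' ' then toks ++ [[]]
  else toks.dropLast ++ [toks.getLast! ++ [c]]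

def pvTokens (s : List Char) : List (List Char) :=
  s.foldl pvTokensStep [[]]

-- _contains_run: sliding-window scan, toks[i:i+n] == target for i in range(len(toks)-n+1).
def pvContainsRun (toks target : List (List Char)) : Bool :=
  let n : Int := target.length
  (PySem.List.pyRange 0 ((toks.length : Int) - n + 1) 1).any
    (fun i => PySem.List.slice toks (some i) (some (i + n)) == target)

def get_query_occurrences_alt (string_to_count : String) (query_list : List String) : List String :=
  let target := pvTokens string_to_count.toList
  query_list.foldl (fun result query =>
    let toks := pvTokens query.toList
    if toks != target && pvContainsRun toks target then result ++ [query]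
    else result) []

-- ===== PRECONDITION & SPEC =====
def Spec_get_query_occurrences (string_to_count : String) (query_list : List String) (out : List String) : Prop := out = get_query_occurrences_alt string_to_count query_list
instance (string_to_count : String) (query_list : List String) (out : List String) : Decidable (Spec_get_query_occurrences string_to_count query_list out) := by unfold Spec_get_query_occurrences; infer_instance

-- ===== CLAIM (what is proved, stated in full; the proofs are below) =====
def Claim_equal_get_query_occurrences : Prop := ∀ (string_to_count : String) (query_list : List String), Dom_get_query_occurrences string_to_count query_list → Spec_get_query_occurrences string_to_count query_list (get_query_occurrences string_to_count query_list)

-- ===== LEMMAS AND PROOFS =====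

-- Clean recursive characterisation of the tokenizer.
def pvMapFirst (cur : List Char) : List (List Char) → List (List Char)
  | [] => [cur]
  | w :: ws => (cur ++ w) :: ws

def pvWords : List Char → List (List Char)
  | [] => [[]]
  | c :: r => if c = ' ' then [] :: pvWords r else pvMapFirst [c] (pvWords r)

def pvUnwords : List (List Char) → List Char
  | [] => []
  | [w] => w
  | w :: ws => w ++ ' ' :: pvUnwords ws

theorem pvWords_ne_nil (s : List Char) : pvWords s ≠ [] := by
  cases s with
  | nil => simp [pvWords]
  | cons c r =>
    simp only [pvWords]
    split
    · simp
    · cases h : pvWords r <;> simp [pvMapFirst]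

theorem pvMapFirst_nil_of_ne_nil (ws : List (List Char)) (h : ws ≠ []) :
    pvMapFirst [] ws = ws := by
  cases ws with
  | nil => exact absurd rfl h
  | cons w ws => simp [pvMapFirst]

theorem pvMapFirst_mapFirst (a b : List Char) (ws : List (List Char)) :
    pvMapFirst a (pvMapFirst b ws) = pvMapFirst (a ++ b) ws := by
  cases ws <;> simp [pvMapFirst]

theorem pvMapFirst_append (a : List Char) (u v : List (List Char)) (h : u ≠ []) :
    pvMapFirst a (u ++ v) = pvMapFirst a u ++ v := by
  cases u with
  | nil => exact absurd rfl h
  | cons w ws => simp [pvMapFirst]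

theorem pvTokens_loop (s : List Char) (pre : List (List Char)) (last : List Char) :
    List.foldl pvTokensStep (pre ++ [last]) s = pre ++ pvMapFirst last (pvWords s) := by
  induction s generalizing pre last with
  | nil => simp [pvWords, pvMapFirst]
  | cons c r ih =>
    by_cases hc : c = ' '
    · subst hc
      have hstep : pvTokensStep (pre ++ [last]) ' ' = (pre ++ [last]) ++ [[]] := by
        simp [pvTokensStep]
      rw [List.foldl_cons, hstep, ih (pre ++ [last]) [],
        pvMapFirst_nil_of_ne_nil _ (pvWords_ne_nil r)]
      simp [pvWords, pvMapFirst]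
    · have hstep : pvTokensStep (pre ++ [last]) c = pre ++ [last ++ [c]] := by
        simp [pvTokensStep, hc]
      rw [List.foldl_cons, hstep, ih pre (last ++ [c])]
      simp only [pvWords, if_neg hc, pvMapFirst_mapFirst]

theorem pvTokens_eq_words (s : List Char) : pvTokens s = pvWords s := by
  have h := pvTokens_loop s [] []
  simpa [pvTokens, pvMapFirst_nil_of_ne_nil _ (pvWords_ne_nil s)] using h

theorem pvUnwords_cons_cons (w v : List Char) (vs : List (List Char)) :
    pvUnwords (w :: v :: vs) = w ++ ' ' :: pvUnwords (v :: vs) := rfl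

theorem pvUnwords_cons (w : List Char) (ws : List (List Char)) (h : ws ≠ []) :
    pvUnwords (w :: ws) = w ++ ' ' :: pvUnwords ws := by
  cases ws with
  | nil => exact absurd rfl h
  | cons v vs => exact pvUnwords_cons_cons w v vs

theorem pvUnwords_mapFirst (a : List Char) (ws : List (List Char)) (h : ws ≠ []) :
    pvUnwords (pvMapFirst a ws) = a ++ pvUnwords ws := by
  cases ws with
  | nil => exact absurd rfl h
  | cons w vs =>
    cases vs with
    | nil => simp [pvMapFirst, pvUnwords]
    | cons v vs' => simp [pvMapFirst, pvUnwords_cons_cons]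

theorem pvUnwords_words (s : List Char) : pvUnwords (pvWords s) = s := by
  induction s with
  | nil => simp [pvWords, pvUnwords]
  | cons c r ih =>
    by_cases hc : c = ' '
    · subst hc
      have hw : pvWords (' ' :: r) = [] :: pvWords r := by simp [pvWords]
      rw [hw, pvUnwords_cons _ _ (pvWords_ne_nil r)]
      simp [ih]
    · simp only [pvWords, if_neg hc]
      rw [pvUnwords_mapFirst _ _ (pvWords_ne_nil r)]
      simp [ih]

theorem pvWords_inj {s t : List Char} (h : pvWords s = pvWords t) : s = t := by
  have := congrArg pvUnwords h
  rwa [pvUnwords_words, pvUnwords_words] at this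

theorem pvWords_append_space (x y : List Char) :
    pvWords (x ++ ' ' :: y) = pvWords x ++ pvWords y := by
  induction x with
  | nil => simp [pvWords]
  | cons c x' ih =>
    by_cases hc : c = ' '
    · subst hc; simp [pvWords, ih]
    · simp only [List.cons_append, pvWords, if_neg hc, ih]
      rw [pvMapFirst_append _ _ _ (pvWords_ne_nil x')]

theorem pvUnwords_append (A B : List (List Char)) (hA : A ≠ []) (hB : B ≠ []) :
    pvUnwords (A ++ B) = pvUnwords A ++ ' ' :: pvUnwords B := by
  induction A with
  | nil => exact absurd rfl hA
  | cons w ws ih =>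
    cases ws with
    | nil =>
      simp only [List.cons_append, List.nil_append]
      rw [pvUnwords_cons _ _ hB]
      rfl
    | cons v vs =>
      rw [List.cons_append, pvUnwords_cons _ _ (by simp), pvUnwords_cons _ _ (by simp),
        ih (by simp)]
      simp

-- The padded needle occurs in the padded query iff one of A's three boundary cases holds or q = cs.
theorem pv_pad_infix_iff (cs q : List Char) :
    (' ' :: cs ++ [' ']) <:+: (' ' :: q ++ [' ']) ↔
      ((cs ++ [' ']) <+: q ∨ (' ' :: cs ++ [' ']) <:+: q ∨ (' ' :: cs) <:+ q ∨ q = cs) := by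
  constructor
  · rintro ⟨l, r, h⟩
    rcases l with _ | ⟨a, l'⟩
    · rcases List.eq_nil_or_concat r with rfl | ⟨r₁, z, rfl⟩
      · right; right; right
        have h' : cs ++ [' '] = q ++ [' '] := by simpa using h
        exact (List.append_cancel_right h').symm
      · left
        have h' : (cs ++ ' ' :: r₁) ++ [z] = q ++ [' '] := by
          simpa [List.append_assoc] using h
        obtain ⟨h1, -⟩ := List.append_inj' h' rfl
        exact ⟨r₁, by simpa [List.append_assoc] using h1⟩
    · have ha : a = ' ' := by simpa using congrArg (·.head?) h
      subst ha
      have htail : l' ++ (' ' :: cs ++ [' ']) ++ r = q ++ [' '] := by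
        simpa using congrArg (·.tail) h
      rcases List.eq_nil_or_concat r with rfl | ⟨r₁, z, rfl⟩
      · right; right; left
        have h' : (l' ++ (' ' :: cs)) ++ [' '] = q ++ [' '] := by
          simpa [List.append_assoc] using htail
        exact ⟨l', List.append_cancel_right h'⟩
      · right; left
        have h' : (l' ++ (' ' :: cs ++ [' ']) ++ r₁) ++ [z] = q ++ [' '] := by
          simpa [List.append_assoc] using htail
        obtain ⟨h1, -⟩ := List.append_inj' h' rfl
        exact ⟨l', r₁, h1⟩
  · rintro (⟨t, rfl⟩ | ⟨l, r, rfl⟩ | ⟨t, rfl⟩ | rfl)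
    · refine ⟨[], t ++ [' '], ?_⟩; simp
    · refine ⟨' ' :: l, r ++ [' '], ?_⟩; simp
    · refine ⟨' ' :: t, [], ?_⟩; simp
    · refine ⟨[], [], ?_⟩; simp

-- Padded substring occurrence ↔ token-list infix.
theorem pv_pad_iff_words_infix (cs q : List Char) :
    (' ' :: cs ++ [' ']) <:+: (' ' :: q ++ [' ']) ↔ pvWords cs <:+: pvWords q := by
  rw [pv_pad_infix_iff]
  constructor
  · rintro (⟨t, rfl⟩ | ⟨l, r, rfl⟩ | ⟨t, rfl⟩ | rfl)
    · refine ⟨[], pvWords t, ?_⟩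
      rw [List.nil_append, ← pvWords_append_space]
      simp [List.append_assoc]
    · refine ⟨pvWords l, pvWords r, ?_⟩
      have : l ++ (' ' :: cs ++ [' ']) ++ r = l ++ ' ' :: (cs ++ ' ' :: r) := by simp
      rw [this, pvWords_append_space, pvWords_append_space]
      simp
    · exact ⟨pvWords t, [], by rw [pvWords_append_space]; simp⟩
    · exact ⟨[], [], by simp⟩
  · rintro ⟨L, R, hLR⟩
    have hq : q = pvUnwords (L ++ pvWords cs ++ R) := by
      rw [hLR, pvUnwords_words]
    rcases L with _ | ⟨w, L'⟩
    · rcases R with _ | ⟨v, R'⟩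
      · right; right; right
        rw [hq]; simp [pvUnwords_words]
      · left
        rw [hq, List.nil_append, pvUnwords_append _ _ (pvWords_ne_nil cs) (by simp),
          pvUnwords_words]
        exact ⟨pvUnwords (v :: R'), by simp⟩
    · rcases R with _ | ⟨v, R'⟩
      · right; right; left
        rw [hq, List.append_nil, pvUnwords_append _ _ (by simp) (pvWords_ne_nil cs),
          pvUnwords_words]
        exact ⟨pvUnwords (w :: L'), rfl⟩
      · right; left
        rw [hq, List.append_assoc, pvUnwords_append _ _ (by simp) (by simp [pvWords_ne_nil cs]),
          pvUnwords_append _ _ (pvWords_ne_nil cs) (by simp), pvUnwords_words]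
        exact ⟨pvUnwords (w :: L'), pvUnwords (v :: R'), by simp⟩

-- The sliding-window scan decides token-list infix.
theorem pvContainsRun_iff (toks target : List (List Char)) :
    pvContainsRun toks target = true ↔ target <:+: toks := by
  simp only [pvContainsRun, List.any_eq_true, PySem.List.mem_pyRange_one, beq_iff_eq]
  constructor
  · rintro ⟨i, ⟨hi0, hilt⟩, hslice⟩
    lift i to ℕ using hi0 with k
    rw [show ((k : Int) + (target.length : Int)) = ((k + target.length : ℕ) : Int) by push_cast; ring]
      at hslice
    rw [PySem.List.slice_natCast] at hslice
    have : (toks.drop k).take (k + target.length - k) = target := hslice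
    rw [Nat.add_sub_cancel_left] at this
    exact this ▸ ((List.take_prefix _ _).isInfix.trans (List.drop_suffix _ _).isInfix)
  · rintro ⟨l, r, rfl⟩
    refine ⟨(l.length : Int), ⟨by positivity, ?_⟩, ?_⟩
    · simp only [List.length_append]
      push_cast
      omega
    · rw [show ((l.length : Int) + (target.length : Int)) = ((l.length + target.length : ℕ) : Int)
        by push_cast; ring, PySem.List.slice_natCast, List.append_assoc, List.drop_left,
        Nat.add_sub_cancel_left, List.take_left]

-- Per-query equivalence of A's three-branch test and B's token test.
theorem pv_test_eq (cs q : List Char) :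
    (PySem.Chars.startswith q (cs ++ [' '])
      || PySem.Chars.isIn (' ' :: cs ++ [' ']) q
      || PySem.Chars.endswith q (' ' :: cs)) =
    ((pvTokens q != pvTokens cs) && pvContainsRun (pvTokens q) (pvTokens cs)) := by
  rw [Bool.eq_iff_iff]
  simp only [Bool.or_eq_true, Bool.and_eq_true, bne_iff_ne, ne_eq,
    PySem.Chars.startswith_iff, PySem.Chars.isIn_iff_infix, PySem.Chars.endswith_iff,
    pvContainsRun_iff, pvTokens_eq_words, ← pv_pad_iff_words_infix]
  have hpad := pv_pad_infix_iff cs q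
  by_cases hq : q = cs
  · subst hq
    constructor
    · rintro ((h | h) | h)
      · have := h.length_le; simp at this
      · have := h.length_le; simp at this
      · have := h.length_le; simp at this
    · rintro ⟨hne, -⟩
      exact absurd rfl hne
  · constructor
    · intro hc
      refine ⟨fun hw => hq (pvWords_inj hw), hpad.mpr (by tauto)⟩
    · rintro ⟨-, hinf⟩
      rcases hpad.mp hinf with h | h | h | h
      · tauto
      · tauto
      · tauto
      · exact absurd h hq

-- ===== VERDICT (by name: the statement is the Claim_ definition above) =====
theorem get_query_occurrences_spec : Claim_equal_get_query_occurrences := by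
  intro s ql _
  show get_query_occurrences s ql = get_query_occurrences_alt s ql
  simp only [get_query_occurrences, get_query_occurrences_alt]
  apply PySem.List.foldl_congr_mem
  intro acc q _
  dsimp only
  rw [← pv_test_eq s.toList q.toList]
  by_cases h1 : PySem.Chars.startswith q.toList (s.toList ++ [' ']) <;>
    by_cases h2 : PySem.Chars.isIn (' ' :: s.toList ++ [' ']) q.toList <;>
    by_cases h3 : PySem.Chars.endswith q.toList (' ' :: s.toList) <;>
    simp_all
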